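-- pv_equiv track=rewrite | github.com/orzalro/baekjoon | 백준/Gold/1043. 거짓말/거짓말.py | calc
-- ===== SOURCE A (Python) =====
-- def calc(k_n, p_list):
--     if len(k_n) == 0: # 진실을 아는 사람이 없는 경우
--         return len(p_list)
--
--     visited = k_n
--     q = k_n
--     while len(q) != 0:
--         k = q.pop()
--         for i, p in enumerate(p_list):
--             if k in p:
--                 for p_m in p:
--                     if p_m not in visited:
--                         visited.append(p_m)
--                         q.append(p_m)
--                 del p_list[i]
--     return len(p_list)
-- ===== SOURCE B (Python) =====
-- def calc(k_n, p_list):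
--     known = set(k_n)
--     for _ in range(len(p_list)):
--         for p in p_list:
--             if known.intersection(p):
--                 known.update(p)
--     return sum(1 for p in p_list if not known.intersection(p))
-- ===== Notes on version B (the rewrite author's own statement) =====
-- stated objective: simpler
-- what changed: Replaces A's mutating worklist loop (pop a person from the aliased visited/queue list, rescan p_list deleting matched parties in place via enumerate+del, with O(n) list-membership tests and re-queued persons) by a bounded fixed-point saturation: len(p_list) sweeps that merge any party intersecting the known set into it, then one counting pass; no mutation of the inputs.
import Mathlib
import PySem

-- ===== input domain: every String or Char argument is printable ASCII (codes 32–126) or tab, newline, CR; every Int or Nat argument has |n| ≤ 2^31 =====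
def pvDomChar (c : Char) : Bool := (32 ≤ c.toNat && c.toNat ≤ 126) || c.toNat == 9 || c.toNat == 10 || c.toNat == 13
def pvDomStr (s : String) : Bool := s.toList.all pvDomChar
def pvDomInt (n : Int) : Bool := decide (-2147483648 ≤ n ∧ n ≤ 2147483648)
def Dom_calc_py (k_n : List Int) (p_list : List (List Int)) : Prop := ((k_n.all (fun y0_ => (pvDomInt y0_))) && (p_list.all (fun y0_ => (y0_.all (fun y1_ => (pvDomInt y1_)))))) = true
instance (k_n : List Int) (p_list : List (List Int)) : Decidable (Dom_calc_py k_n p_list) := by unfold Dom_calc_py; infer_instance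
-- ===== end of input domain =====

-- B replaces A's mutating worklist loop by a bounded fixed-point saturation (simpler; measured
-- faster in a timing run); equivalence is about the RETURN value only: Python A mutates k_n
-- and p_list in place, B does not.

-- ===== PORT A =====
-- In A, `visited` and `q` are the SAME list object (aliases of k_n): `pop()` removes from both,
-- and a new member is appended TWICE (visited.append + q.append).  The inner
-- `for i, p in enumerate(p_list)` with `del p_list[i]`: the list-iterator index and the enumerate
-- count advance together past a deletion, so after a match the next examined element skips one;
-- modelled exactly by `j+1` on both branches with `eraseIdx` on a match.
def calcA_members (L : List Int) (p : List Int) : List Int :=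
  p.foldl (fun acc m => if m ∈ acc then acc else (acc ++ [m]) ++ [m]) L

def calcA_inner (k : Int) (L : List Int) (kept rest : List (List Int)) :
    List Int × List (List Int) :=
  match rest with
  | [] => (L, kept)
  | p :: rest' =>
    if k ∈ p then
      match rest' with
      | [] => (calcA_members L p, kept)
      | q :: rest'' => calcA_inner k (calcA_members L p) (kept ++ [q]) rest''
    else calcA_inner k L (kept ++ [p]) rest'

-- termination lemma for the outer loop (cited in its decreasing_by)
theorem calcA_inner_len (k : Int) (L : List Int) (kept rest : List (List Int)) :
    (calcA_inner k L kept rest).2.length ≤ kept.length + rest.length ∧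
    ((calcA_inner k L kept rest).2.length = kept.length + rest.length →
      (calcA_inner k L kept rest).1 = L) := by
  fun_induction calcA_inner k L kept rest with
  | case1 L kept => exact ⟨by simp, fun _ => rfl⟩
  | case2 L kept p hk =>
    refine ⟨by simp, ?_⟩
    intro h
    exfalso
    simp at h
  | case3 L kept p hk q rest'' ih =>
    rcases ih with ⟨h1, _⟩
    simp at h1 ⊢
    omega
  | case4 L kept p rest' hk ih =>
    rcases ih with ⟨h1, h2⟩
    simp at h1 ⊢
    refine ⟨by omega, ?_⟩
    intro h
    apply h2
    simp
    omega

def calcA_outer (L : List Int) (P : List (List Int)) : Int :=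
  if hL : L = [] then (P.length : Int)
  else
    let r := calcA_inner (L.getLast hL) L.dropLast [] P
    calcA_outer r.1 r.2
termination_by (P.length, L.length)
decreasing_by
  have h := calcA_inner_len (L.getLast hL) L.dropLast [] P
  rcases Nat.lt_or_ge (calcA_inner (L.getLast hL) L.dropLast [] P).2.length P.length with hlt | hge
  · exact Prod.Lex.left _ _ hlt
  · have heq : (calcA_inner (L.getLast hL) L.dropLast [] P).2.length = P.length := by
      have := h.1; simp at this ⊢; omega
    have hL1 := h.2 (by simpa using heq)
    rw [heq, hL1]
    exact Prod.Lex.right _ (by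
      have : L.length ≠ 0 := by simpa [List.length_eq_zero_iff] using hL
      simp [List.length_dropLast]; omega)

def calc_py (k_n : List Int) (p_list : List (List Int)) : Int :=
  if k_n.length = 0 then (p_list.length : Int)
  else calcA_outer k_n p_list

-- ===== PORT B =====
def calcB_step (known : PySem.Set Int) (p : List Int) : PySem.Set Int :=
  if (PySem.Set.inter known p).isEmpty then known else PySem.Set.update known p

def calcB_sweep (p_list : List (List Int)) (known : PySem.Set Int) : PySem.Set Int :=
  p_list.foldl calcB_step known

def calc_py_alt (k_n : List Int) (p_list : List (List Int)) : Int :=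
  let known := (List.range p_list.length).foldl
    (fun known _ => calcB_sweep p_list known) (PySem.Set.ofList k_n)
  ((p_list.countP (fun p => (PySem.Set.inter known p).isEmpty) : Nat) : Int)

-- ===== PRECONDITION & SPEC =====
def Spec_calc_py (k_n : List Int) (p_list : List (List Int)) (out : Int) : Prop := out = calc_py_alt k_n p_list
instance (k_n : List Int) (p_list : List (List Int)) (out : Int) : Decidable (Spec_calc_py k_n p_list out) := by unfold Spec_calc_py; infer_instance

-- ===== CLAIM (what is proved, stated in full; the proofs are below) =====
def Claim_equal_calc_py : Prop := ∀ (k_n : List Int) (p_list : List (List Int)), Dom_calc_py k_n p_list → Spec_calc_py k_n p_list (calc_py k_n p_list)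

-- ===== LEMMAS AND PROOFS =====

-- the closure of `base` under "a party meeting the set pulls all its members in"
inductive InCl (base : List Int) (P : List (List Int)) : Int → Prop
  | base {x : Int} : x ∈ base → InCl base P x
  | step {x y : Int} {p : List Int} : p ∈ P → y ∈ p → InCl base P y → x ∈ p → InCl base P x

-- B's saturated set, as computed by the port of B
def cloSet (L : List Int) (P : List (List Int)) : PySem.Set Int :=
  (List.range P.length).foldl (fun known _ => calcB_sweep P known) (PySem.Set.ofList L)

theorem InCl_closed {base : List Int} {P : List (List Int)} (C : Int → Prop)
    (hb : ∀ x ∈ base, C x)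
    (hc : ∀ p ∈ P, (∃ y ∈ p, C y) → ∀ x ∈ p, C x) :
    ∀ x, InCl base P x → C x := by
  intro x h
  induction h with
  | base hx => exact hb _ hx
  | step hp hy _hin hx ih => exact hc _ hp ⟨_, hy, ih⟩ _ hx

theorem InCl_nil {P : List (List Int)} {x : Int} : ¬ InCl [] P x := by
  intro h
  exact InCl_closed (fun _ => False) (by simp) (fun p _ hy _ _ => hy.elim (fun y hy => hy.2)) x h

theorem InCl_mono_base {b1 b2 : List Int} {P : List (List Int)} (h : ∀ x ∈ b1, x ∈ b2) :
    ∀ x, InCl b1 P x → InCl b2 P x := by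
  refine InCl_closed _ (fun x hx => InCl.base (h x hx)) ?_
  rintro p hp ⟨y, hy, hin⟩ x hx
  exact InCl.step hp hy hin hx

-- ---- B-side: membership facts about the sweep fold ----

theorem inter_isEmpty_iff {S : PySem.Set Int} {p : List Int} :
    (PySem.Set.inter S p).isEmpty = true ↔ ∀ m ∈ p, m ∉ S := by
  rw [List.isEmpty_iff, List.eq_nil_iff_forall_not_mem]
  constructor
  · intro h m hmp hmS
    exact h m (by rw [PySem.Set.mem_inter]; exact ⟨hmS, hmp⟩)
  · intro h a ha
    rw [PySem.Set.mem_inter] at ha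
    exact h a ha.2 ha.1

theorem mem_calcB_step_of_mem {S : PySem.Set Int} {p : List Int} {x : Int} (hx : x ∈ S) :
    x ∈ calcB_step S p := by
  unfold calcB_step
  split
  · exact hx
  · exact (PySem.Set.mem_update _ _ _).mpr (Or.inl hx)

theorem mem_fold_of_mem {Q : List (List Int)} : ∀ {S : PySem.Set Int} {x : Int},
    x ∈ S → x ∈ Q.foldl calcB_step S := by
  induction Q with
  | nil => intro S x hx; simpa using hx
  | cons p Q ih => intro S x hx; exact ih (mem_calcB_step_of_mem hx)

theorem mem_of_mem_fold {Q : List (List Int)} : ∀ {S : PySem.Set Int} {x : Int},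
    x ∈ Q.foldl calcB_step S → x ∈ S ∨ ∃ p ∈ Q, x ∈ p := by
  induction Q with
  | nil => intro S x hx; exact Or.inl (by simpa using hx)
  | cons q Q ih =>
    intro S x hx
    rcases ih hx with h | ⟨p, hp, hxp⟩
    · unfold calcB_step at h
      split at h
      · exact Or.inl h
      · rcases (PySem.Set.mem_update _ _ _).mp h with h | h
        · exact Or.inl h
        · exact Or.inr ⟨q, by simp, h⟩
    · exact Or.inr ⟨p, by simp [hp], hxp⟩

theorem party_subset_fold {Q : List (List Int)} : ∀ {S : PySem.Set Int} {p : List Int},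
    p ∈ Q → (∃ y ∈ p, y ∈ S) → ∀ x ∈ p, x ∈ Q.foldl calcB_step S := by
  induction Q with
  | nil => intro S p hp; simp at hp
  | cons q Q ih =>
    intro S p hp hy x hx
    rcases List.mem_cons.mp hp with rfl | hpQ
    · have hne : ¬ (PySem.Set.inter S p).isEmpty = true := by
        intro hc
        rcases hy with ⟨y, hyp, hyS⟩
        exact (inter_isEmpty_iff.mp hc) y hyp hyS
      have hstep : calcB_step S p = PySem.Set.update S p := by
        unfold calcB_step; rw [if_neg hne]
      rw [List.foldl_cons, hstep]
      exact mem_fold_of_mem ((PySem.Set.mem_update _ _ _).mpr (Or.inr hx))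
    · rcases hy with ⟨y, hyp, hyS⟩
      rw [List.foldl_cons]
      exact ih hpQ ⟨y, hyp, mem_calcB_step_of_mem hyS⟩ x hx

theorem progress_fold {Q : List (List Int)} : ∀ {S : PySem.Set Int} {x : Int},
    x ∈ Q.foldl calcB_step S → x ∉ S →
    ∃ p ∈ Q, (∀ m ∈ p, m ∈ Q.foldl calcB_step S) ∧ ∃ m ∈ p, m ∉ S := by
  induction Q with
  | nil => intro S x hx hnx; simp at hx; exact absurd hx hnx
  | cons q Q ih =>
    intro S x hx hnx
    rw [List.foldl_cons] at hx
    by_cases hxS : x ∈ calcB_step S q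
    · -- x was added by the step on q
      have hq : calcB_step S q = PySem.Set.update S q ∧ x ∈ q := by
        by_cases hc : (PySem.Set.inter S q).isEmpty = true
        · exfalso
          have : calcB_step S q = S := by unfold calcB_step; rw [if_pos hc]
          rw [this] at hxS
          exact hnx hxS
        · have h1 : calcB_step S q = PySem.Set.update S q := by
            unfold calcB_step; rw [if_neg hc]
          refine ⟨h1, ?_⟩
          rw [h1] at hxS
          rcases (PySem.Set.mem_update _ _ _).mp hxS with h | h
          · exact absurd h hnx
          · exact h
      refine ⟨q, by simp, ?_, x, hq.2, hnx⟩
      intro m hm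
      rw [List.foldl_cons]
      exact mem_fold_of_mem (by rw [hq.1]; exact (PySem.Set.mem_update _ _ _).mpr (Or.inr hm))
    · rcases ih hx hxS with ⟨p, hp, hsub, m, hm, hmS⟩
      refine ⟨p, by simp [hp], ?_, m, hm, fun hmem => hmS (mem_calcB_step_of_mem hmem)⟩
      intro a ha
      rw [List.foldl_cons]
      exact hsub a ha

theorem update_eq_self {S : PySem.Set Int} {p : List Int} (h : ∀ m ∈ p, m ∈ S) :
    PySem.Set.update S p = S := by
  rw [PySem.Set.update_eq_append_filter]
  have : (PySem.Set.ofList p).filter (fun y => !(PySem.Set.contains S y)) = [] := by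
    rw [List.filter_eq_nil_iff]
    intro y hy
    have hyS : y ∈ S := h y ((PySem.Set.mem_ofList _ _).mp hy)
    simpa using hyS
  rw [this, List.append_nil]

theorem stable_fold {Q : List (List Int)} : ∀ {S : PySem.Set Int},
    (∀ x ∈ Q.foldl calcB_step S, x ∈ S) → Q.foldl calcB_step S = S := by
  induction Q with
  | nil => intro S _; rfl
  | cons q Q ih =>
    intro S h
    have hq : calcB_step S q = S := by
      by_cases hc : (PySem.Set.inter S q).isEmpty = true
      · unfold calcB_step; rw [if_pos hc]
      · have hu : calcB_step S q = PySem.Set.update S q := by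
          unfold calcB_step; rw [Bool.eq_false_iff.mpr hc]; simp
        rw [hu]
        apply update_eq_self
        intro m hm
        apply h
        rw [List.foldl_cons, hu]
        exact mem_fold_of_mem ((PySem.Set.mem_update _ _ _).mpr (Or.inr hm))
    rw [List.foldl_cons, hq] at h ⊢
    exact ih h

-- strict countP growth
theorem countP_lt_of_witness {α : Type} {l : List α} {p q : α → Bool}
    (h : ∀ a ∈ l, p a = true → q a = true) :
    ∀ {a : α}, a ∈ l → q a = true → ¬ p a = true → l.countP p < l.countP q := by
  induction l with
  | nil => intro a ha; simp at ha
  | cons b l ih =>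
    intro a ha hq hp
    rw [List.countP_cons, List.countP_cons]
    rcases List.mem_cons.mp ha with rfl | hal
    · have hmono : l.countP p ≤ l.countP q :=
        List.countP_mono_left (fun x hx => h x (List.mem_cons_of_mem _ hx))
      rw [hq, Bool.eq_false_iff.mpr hp]
      simp; omega
    · have hlt := ih (fun x hx => h x (List.mem_cons_of_mem _ hx)) hal hq hp
      have : p b = true → q b = true := h b (List.mem_cons_self ..)
      cases hpb : p b
      · simp; omega
      · rw [this hpb]; simp; omega

-- iterate bridge for the round loop
theorem foldl_range_iterate {β : Type} (g : β → β) (S : β) :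
    ∀ n : Nat, (List.range n).foldl (fun S _ => g S) S = g^[n] S := by
  intro n
  induction n with
  | zero => rfl
  | succ n ihn =>
    rw [List.range_succ, List.foldl_append, ihn, Function.iterate_succ_apply']
    rfl

theorem sweep_stable (P : List (List Int)) (S0 : PySem.Set Int) :
    P.foldl calcB_step ((fun S => P.foldl calcB_step S)^[P.length] S0) =
      (fun S => P.foldl calcB_step S)^[P.length] S0 := by
  set g : PySem.Set Int → PySem.Set Int := fun S => P.foldl calcB_step S with hg
  set cnt : PySem.Set Int → Nat := fun S => P.countP (fun p => p.all (fun m => decide (m ∈ S))) with hcnt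
  have key : ∀ r : Nat, (∃ i ≤ r, g (g^[i] S0) = g^[i] S0) ∨ r ≤ cnt (g^[r] S0) := by
    intro r
    induction r with
    | zero => exact Or.inr (Nat.zero_le _)
    | succ r ihr =>
      rcases ihr with ⟨i, hi, hfix⟩ | hr
      · exact Or.inl ⟨i, Nat.le_succ_of_le hi, hfix⟩
      · by_cases hfix : g (g^[r] S0) = g^[r] S0
        · exact Or.inl ⟨r, Nat.le_succ _, hfix⟩
        · right
          -- not stable: some new element appears, hence some party newly becomes a subset
          have hnew : ∃ x, x ∈ g (g^[r] S0) ∧ x ∉ g^[r] S0 := by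
            by_contra hno
            push Not at hno
            exact hfix (stable_fold hno)
          rcases hnew with ⟨x, hx1, hx2⟩
          rcases progress_fold hx1 hx2 with ⟨p, hp, hsub, m, hm, hmS⟩
          have hlt : cnt (g^[r] S0) < cnt (g (g^[r] S0)) := by
            apply countP_lt_of_witness
              (fun a _ ha => by
                rw [List.all_eq_true] at ha ⊢
                intro m hma
                exact decide_eq_true (mem_fold_of_mem (of_decide_eq_true (ha m hma))))
              hp
            · rw [List.all_eq_true]
              intro y hy
              exact decide_eq_true (hsub y hy)
            · rw [List.all_eq_true]
              push Not
              exact ⟨m, hm, by simpa using hmS⟩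
          rw [Function.iterate_succ_apply']
          omega
  rcases key P.length with ⟨i, hi, hfix⟩ | hn
  · have : g^[P.length] S0 = g^[i] S0 := by
      have := Function.iterate_fixed hfix (P.length - i)
      calc g^[P.length] S0 = g^[P.length - i] (g^[i] S0) := by
            rw [← Function.iterate_add_apply]
            congr 1
            omega
        _ = g^[i] S0 := this
    rw [this]
    exact hfix
  · have hall : ∀ p ∈ P, ∀ m ∈ p, m ∈ g^[P.length] S0 := by
      have hle : cnt (g^[P.length] S0) ≤ P.length := List.countP_le_length
      have heq : cnt (g^[P.length] S0) = P.length := Nat.le_antisymm hle hn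
      intro p hp m hm
      have := List.countP_eq_length.mp heq p hp
      rw [List.all_eq_true] at this
      exact of_decide_eq_true (this m hm)
    apply stable_fold
    intro x hx
    rcases mem_of_mem_fold hx with h | ⟨p, hp, hxp⟩
    · exact h
    · exact hall p hp x hxp

theorem mem_cloSet {L : List Int} {P : List (List Int)} {x : Int} :
    x ∈ cloSet L P ↔ InCl L P x := by
  have hclo : cloSet L P = (fun S => P.foldl calcB_step S)^[P.length] (PySem.Set.ofList L) := by
    unfold cloSet calcB_sweep
    exact foldl_range_iterate _ _ _
  constructor
  · -- soundness
    rw [hclo]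
    have : ∀ (r : Nat) (y : Int), y ∈ (fun S => P.foldl calcB_step S)^[r] (PySem.Set.ofList L) → InCl L P y := by
      intro r
      induction r with
      | zero => intro y hy; exact InCl.base ((PySem.Set.mem_ofList _ _).mp hy)
      | succ r ihr =>
        rw [Function.iterate_succ_apply']
        -- one sweep preserves soundness
        have hfold : ∀ (Q : List (List Int)), (∀ q ∈ Q, q ∈ P) →
            ∀ (S : PySem.Set Int), (∀ y ∈ S, InCl L P y) → ∀ y ∈ Q.foldl calcB_step S, InCl L P y := by
          intro Q
          induction Q with
          | nil => intro _ S hS y hy; exact hS y (by simpa using hy)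
          | cons q Q ihQ =>
            intro hQ S hS y hy
            rw [List.foldl_cons] at hy
            refine ihQ (fun q' hq' => hQ q' (List.mem_cons_of_mem _ hq')) _ ?_ y hy
            intro z hz
            unfold calcB_step at hz
            split at hz
            · exact hS z hz
            · rcases (PySem.Set.mem_update _ _ _).mp hz with h | h
              · exact hS z h
              · rename_i hne
                have hne2 : PySem.Set.inter S q ≠ [] := by
                  intro hnil
                  apply hne
                  rw [hnil]
                  rfl
                rcases List.exists_mem_of_ne_nil _ hne2 with ⟨w, hw⟩
                rw [PySem.Set.mem_inter] at hw
                exact InCl.step (hQ q (List.mem_cons_self ..)) hw.2 (hS w hw.1) h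
        intro y hy
        exact hfold P (fun _ h => h) _ (ihr) y hy
    exact this P.length x
  · -- completeness: the iterated sweep is stable and closed
    intro h
    refine InCl_closed (fun y => y ∈ cloSet L P) ?_ ?_ x h
    · intro y hy
      rw [hclo]
      have : y ∈ PySem.Set.ofList L := (PySem.Set.mem_ofList _ _).mpr hy
      clear h
      generalize PySem.Set.ofList L = S at this ⊢
      induction P.length with
      | zero => exact this
      | succ n ihn => rw [Function.iterate_succ_apply']; exact mem_fold_of_mem ihn
    · rintro p hp ⟨y, hy, hyin⟩ z hz
      rw [hclo] at hyin ⊢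
      have := party_subset_fold (S := (fun S => P.foldl calcB_step S)^[P.length] (PySem.Set.ofList L)) hp ⟨y, hy, hyin⟩ z hz
      rw [sweep_stable] at this
      exact this

-- ---- A-side: the inner loop (enumerate + del, with the aliased visited/queue list) ----

theorem mem_members_aux : ∀ (p L : List Int) (x : Int),
    x ∈ p.foldl (fun acc m => if m ∈ acc then acc else (acc ++ [m]) ++ [m]) L ↔ x ∈ L ∨ x ∈ p := by
  intro p
  induction p with
  | nil => simp
  | cons m p ih =>
    intro L x
    rw [List.foldl_cons]
    by_cases hm : m ∈ L
    · rw [if_pos hm, ih]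
      constructor
      · rintro (h | h)
        · exact Or.inl h
        · exact Or.inr (List.mem_cons_of_mem _ h)
      · rintro (h | h)
        · exact Or.inl h
        · rcases List.mem_cons.mp h with rfl | h
          · exact Or.inl hm
          · exact Or.inr h
    · rw [if_neg hm, ih]
      simp only [List.mem_append, List.mem_cons]
      tauto

theorem mem_members {L p : List Int} {x : Int} :
    x ∈ calcA_members L p ↔ x ∈ L ∨ x ∈ p := by
  unfold calcA_members
  exact mem_members_aux p L x

theorem inner_spec (k : Int) (L : List Int) (kept rest : List (List Int)) :
    ∃ D : List (List Int),
      (kept ++ rest).Perm ((calcA_inner k L kept rest).2 ++ D) ∧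
      (∀ p ∈ D, k ∈ p ∧ ∀ m ∈ p, m ∈ (calcA_inner k L kept rest).1) ∧
      (∀ x ∈ L, x ∈ (calcA_inner k L kept rest).1) ∧
      (∀ x ∈ (calcA_inner k L kept rest).1, x ∈ L ∨ ∃ p ∈ D, x ∈ p) ∧
      (D = [] → (calcA_inner k L kept rest).1 = L ∧
        (calcA_inner k L kept rest).2 = kept ++ rest ∧ ∀ p ∈ rest, k ∉ p) ∧
      (D ≠ [] → k ∈ (calcA_inner k L kept rest).1) := by
  fun_induction calcA_inner k L kept rest with
  | case1 L kept =>
    exact ⟨[], by simp, by simp, fun x hx => hx, fun x hx => Or.inl hx,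
      fun _ => ⟨rfl, by simp, by simp⟩, by simp⟩
  | case2 L kept p hk =>
    refine ⟨[p], by simp, ?_, ?_, ?_, ?_, ?_⟩
    · intro q hq
      rcases List.mem_singleton.mp hq with rfl
      exact ⟨hk, fun m hm => mem_members.mpr (Or.inr hm)⟩
    · intro x hx
      exact mem_members.mpr (Or.inl hx)
    · intro x hx
      rcases mem_members.mp hx with h | h
      · exact Or.inl h
      · exact Or.inr ⟨p, by simp, h⟩
    · intro h; simp at h
    · intro _; exact mem_members.mpr (Or.inr hk)
  | case3 L kept p hk q rest'' ih =>
    rcases ih with ⟨D0, hperm, hD, hgrow, hsub, _hnil, _hkm⟩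
    refine ⟨p :: D0, ?_, ?_, ?_, ?_, ?_, ?_⟩
    · have e1 : kept ++ (p :: q :: rest'') = kept ++ p :: (q :: rest'') := rfl
      have h1 : (kept ++ p :: (q :: rest'')).Perm (p :: (kept ++ (q :: rest''))) :=
        List.perm_middle
      have e2 : kept ++ (q :: rest'') = (kept ++ [q]) ++ rest'' := by simp
      refine (h1.trans ?_)
      rw [e2]
      refine ((hperm.cons p).trans ?_)
      exact List.perm_middle.symm
    · intro q' hq'
      rcases List.mem_cons.mp hq' with rfl | hq'
      · exact ⟨hk, fun m hm => hgrow m (mem_members.mpr (Or.inr hm))⟩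
      · exact hD q' hq'
    · intro x hx
      exact hgrow x (mem_members.mpr (Or.inl hx))
    · intro x hx
      rcases hsub x hx with h | ⟨p', hp', h⟩
      · rcases mem_members.mp h with h' | h'
        · exact Or.inl h'
        · exact Or.inr ⟨p, List.mem_cons_self .., h'⟩
      · exact Or.inr ⟨p', List.mem_cons_of_mem _ hp', h⟩
    · intro h; simp at h
    · intro _
      exact hgrow k (mem_members.mpr (Or.inr hk))
  | case4 L kept p rest' hk ih =>
    rcases ih with ⟨D0, hperm, hD, hgrow, hsub, hnil, hkm⟩
    refine ⟨D0, ?_, hD, hgrow, hsub, ?_, hkm⟩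
    · have e : kept ++ (p :: rest') = (kept ++ [p]) ++ rest' := by simp
      rw [e]
      exact hperm
    · intro h0
      rcases hnil h0 with ⟨h1, h2, h3⟩
      refine ⟨h1, by rw [h2]; simp, ?_⟩
      intro p' hp'
      rcases List.mem_cons.mp hp' with rfl | hp'
      · exact hk
      · exact h3 p' hp'

-- pointwise bridge between the Bool predicate of B's count and the closure
theorem pred_iff {L : List Int} {P : List (List Int)} {p : List Int} :
    ((PySem.Set.inter (cloSet L P) p).isEmpty = true) ↔ ∀ m ∈ p, ¬ InCl L P m := by
  rw [inter_isEmpty_iff]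
  constructor
  · intro h m hm hin; exact h m hm (mem_cloSet.mpr hin)
  · intro h m hm hmem; exact h m hm (mem_cloSet.mp hmem)

theorem countP_ext {α : Type} {l : List α} {p q : α → Bool} (h : ∀ a ∈ l, p a = q a) :
    l.countP p = l.countP q := by
  induction l with
  | nil => rfl
  | cons b l ih =>
    rw [List.countP_cons, List.countP_cons, h b (List.mem_cons_self ..),
      ih (fun a ha => h a (List.mem_cons_of_mem _ ha))]

theorem outer_inv : ∀ (L : List Int) (P : List (List Int)),
    calcA_outer L P = ((P.countP fun p => (PySem.Set.inter (cloSet L P) p).isEmpty : Nat) : Int) := by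
  intro L P
  fun_induction calcA_outer L P with
  | case1 P =>
    have hall : ∀ p ∈ P, ((PySem.Set.inter (cloSet [] P) p).isEmpty = true) :=
      fun p _ => pred_iff.mpr (fun m _ h => InCl_nil h)
    rw [List.countP_eq_length.mpr hall]
  | case2 L P hL r ih =>
    rcases inner_spec (L.getLast hL) L.dropLast [] P with ⟨D, hperm, hD, hgrow, hsub, hnil, hkm⟩
    have hrdef : calcA_inner (L.getLast hL) L.dropLast [] P = r := rfl
    rw [hrdef] at hperm hD hgrow hsub hnil hkm
    rw [List.nil_append] at hperm hnil
    set k := L.getLast hL with hk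
    have hLfull : L.dropLast ++ [k] = L := List.dropLast_append_getLast hL
    have hkL : k ∈ L := by rw [← hLfull]; simp
    have hdropL : ∀ x ∈ L.dropLast, x ∈ L := by
      intro x hx; rw [← hLfull]; simp [hx]
    have hmemL : ∀ x ∈ L, x ∈ L.dropLast ∨ x = k := by
      intro x hx; rw [← hLfull] at hx; simpa using hx
    rw [ih]
    by_cases hDnil : D = []
    · rcases hnil hDnil with ⟨h1, h2, h3⟩
      have h3' : ∀ p ∈ P, k ∉ p := by simpa using h3
      rw [h1, h2]
      congr 1
      apply countP_ext
      intro p hp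
      rw [Bool.eq_iff_iff, pred_iff, pred_iff]
      constructor
      · intro h m hm hin
        have := InCl_closed (fun x => x = k ∨ InCl L.dropLast P x)
          (by intro x hx
              rcases hmemL x hx with h' | h'
              · exact Or.inr (InCl.base h')
              · exact Or.inl h')
          (by rintro q hq ⟨y, hy, hC⟩ x hx
              rcases hC with rfl | hC
              · exact absurd hy (h3' q hq)
              · exact Or.inr (InCl.step hq hy hC hx)) m hin
        rcases this with rfl | h'
        · exact (h3' p hp) hm
        · exact h m hm h'
      · intro h m hm hin
        exact h m hm (InCl_mono_base hdropL m hin)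
    · have hk1 : k ∈ r.1 := hkm hDnil
      have hiff : ∀ x, InCl L P x ↔ InCl r.1 r.2 x := by
        intro x
        constructor
        · refine InCl_closed (fun x => InCl r.1 r.2 x) ?_ ?_ x
          · intro y hy
            rcases hmemL y hy with h' | rfl
            · exact InCl.base (hgrow y h')
            · exact InCl.base hk1
          · rintro p hp ⟨y, hy, hC⟩ z hz
            have hpin : p ∈ r.2 ++ D := (hperm.mem_iff).mp hp
            rcases List.mem_append.mp hpin with h' | h'
            · exact InCl.step h' hy hC hz
            · exact InCl.base ((hD p h').2 z hz)
        · refine InCl_closed (fun x => InCl L P x) ?_ ?_ x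
          · intro y hy
            rcases hsub y hy with h' | ⟨p, hp, hyp⟩
            · exact InCl.base (hdropL y h')
            · have hpP : p ∈ P := (hperm.mem_iff).mpr (List.mem_append.mpr (Or.inr hp))
              exact InCl.step hpP ((hD p hp).1) (InCl.base hkL) hyp
          · rintro p hp ⟨y, hy, hC⟩ z hz
            exact InCl.step ((hperm.mem_iff).mpr (List.mem_append.mpr (Or.inl hp))) hy hC hz
      have hpermc := hperm.countP_eq (fun p => (PySem.Set.inter (cloSet L P) p).isEmpty)
      rw [List.countP_append] at hpermc
      have hD0 : D.countP (fun p => (PySem.Set.inter (cloSet L P) p).isEmpty) = 0 := by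
        rw [List.countP_eq_zero]
        intro p hp hpt
        exact (pred_iff.mp hpt) k ((hD p hp).1) (InCl.base hkL)
      have hsame : r.2.countP (fun p => (PySem.Set.inter (cloSet L P) p).isEmpty)
          = r.2.countP (fun p => (PySem.Set.inter (cloSet r.1 r.2) p).isEmpty) := by
        apply countP_ext
        intro p hp
        rw [Bool.eq_iff_iff, pred_iff, pred_iff]
        constructor
        · intro h m hm hin
          exact h m hm ((hiff m).mpr hin)
        · intro h m hm hin
          exact h m hm ((hiff m).mp hin)
      congr 1
      omega

-- ===== VERDICT (by name: the statement is the Claim_ definition above) =====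
theorem calc_py_spec : Claim_equal_calc_py := by
  unfold Claim_equal_calc_py
  intro k_n P _
  unfold Spec_calc_py
  have halt : calc_py_alt k_n P
      = ((P.countP fun p => (PySem.Set.inter (cloSet k_n P) p).isEmpty : Nat) : Int) := rfl
  rw [halt]
  unfold calc_py
  split
  · rename_i h0
    have h1 : k_n = [] := List.length_eq_zero_iff.mp h0
    subst h1
    have hall : ∀ p ∈ P, ((PySem.Set.inter (cloSet [] P) p).isEmpty = true) :=
      fun p _ => pred_iff.mpr (fun m _ h => InCl_nil h)
    rw [List.countP_eq_length.mpr hall]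
  · rw [outer_inv]
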